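-- pv_equiv track=rewrite | github.com/CesarSanchezGomez/DxSentinelRef | backend/core/generators/metadata/metadata_generator.py | _categorize_field
-- ===== SOURCE A (Python) =====
-- def _categorize_field(field_id: str) -> str:
--
--     field_lower = field_id.lower()
--
--     if any(k in field_lower for k in ["id", "code", "number"]):
--         return "identifier"
--     elif "date" in field_lower:
--         return "temporal"
--     elif "custom" in field_lower or "udf" in field_lower:
--         return "custom"
--     elif any(k in field_lower for k in ["name", "title", "description"]):
--         return "descriptive"
--     else:
--         return "operational"
-- ===== SOURCE B (Python) =====
-- KEYWORD_PRIORITY = {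
--     "id": 0, "code": 0, "number": 0,
--     "date": 1,
--     "custom": 2, "udf": 2,
--     "name": 3, "title": 3, "description": 3,
-- }
-- CATEGORIES = ["identifier", "temporal", "custom", "descriptive", "operational"]
--
--
-- def _categorize_field(field_id: str) -> str:
--     low = field_id.lower()
--     best = min((p for k, p in KEYWORD_PRIORITY.items() if k in low), default=len(CATEGORIES) - 1)
--     return CATEGORIES[best]
-- ===== Notes on version B (the rewrite author's own statement) =====
-- stated objective: alternative
-- what changed: Replaces the short-circuiting if/elif chain over keyword groups by an aggregation: one flat keyword->priority map is scanned once, the minimum priority among all matched keywords is taken (min with a default), and that priority indexes a category table.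
import Mathlib
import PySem

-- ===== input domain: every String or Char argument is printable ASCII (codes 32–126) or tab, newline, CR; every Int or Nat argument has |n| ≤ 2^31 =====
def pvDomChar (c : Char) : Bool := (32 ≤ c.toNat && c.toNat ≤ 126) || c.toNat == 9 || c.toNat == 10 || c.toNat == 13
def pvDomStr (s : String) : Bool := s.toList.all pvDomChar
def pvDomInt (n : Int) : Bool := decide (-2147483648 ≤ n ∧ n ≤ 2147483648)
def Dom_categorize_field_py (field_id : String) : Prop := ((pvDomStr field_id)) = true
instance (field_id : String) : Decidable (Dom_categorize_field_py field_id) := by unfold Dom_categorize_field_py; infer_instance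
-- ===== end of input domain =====

-- B replaces A's short-circuiting if/elif chain by an aggregation: one flat keyword→priority map, take the
-- MINIMUM priority among all matched keywords, and index a category table with it (simpler data-driven shape).
-- ===== PORT A =====
def categorize_field_py (field_id : String) : String :=
  let field_lower := PySem.Str.lower field_id
  if ["id", "code", "number"].any (fun k => PySem.Str.isIn k field_lower) then "identifier"
  else if PySem.Str.isIn "date" field_lower then "temporal"
  else if PySem.Str.isIn "custom" field_lower || PySem.Str.isIn "udf" field_lower then "custom"
  else if ["name", "title", "description"].any (fun k => PySem.Str.isIn k field_lower) then "descriptive"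
  else "operational"

-- ===== PORT B =====
def pvKEYWORD_PRIORITY : List (String × Nat) :=
  [("id", 0), ("code", 0), ("number", 0),
   ("date", 1),
   ("custom", 2), ("udf", 2),
   ("name", 3), ("title", 3), ("description", 3)]

def pvCATEGORIES : List String :=
  ["identifier", "temporal", "custom", "descriptive", "operational"]

def categorize_field_py_alt (field_id : String) : String :=
  let low := PySem.Str.lower field_id
  -- min((p for k, p in KEYWORD_PRIORITY.items() if k in low), default=len(CATEGORIES)-1)
  let best := PySem.List.minD
      ((pvKEYWORD_PRIORITY.filter (fun kp => PySem.Str.isIn kp.1 low)).map Prod.snd)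
      id (pvCATEGORIES.length - 1)
  -- CATEGORIES[best]: best is always a valid index (0..4), so plain getD is exact here
  pvCATEGORIES.getD best ""

-- ===== PRECONDITION & SPEC =====
def Spec_categorize_field_py (field_id : String) (out : String) : Prop := out = categorize_field_py_alt field_id
instance (field_id : String) (out : String) : Decidable (Spec_categorize_field_py field_id out) := by unfold Spec_categorize_field_py; infer_instance

-- ===== CLAIM (what is proved, stated in full; the proofs are below) =====
def Claim_equal_categorize_field_py : Prop := ∀ (field_id : String), Dom_categorize_field_py field_id → Spec_categorize_field_py field_id (categorize_field_py field_id)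

-- ===== LEMMAS AND PROOFS =====
theorem categorize_field_py_agree (field_id : String) :
    categorize_field_py field_id = categorize_field_py_alt field_id := by
  unfold categorize_field_py categorize_field_py_alt pvKEYWORD_PRIORITY pvCATEGORIES
  simp only [List.any_cons, List.any_nil, List.filter_cons, List.filter_nil, Bool.or_false]
  generalize PySem.Str.isIn "id" (PySem.Str.lower field_id) = b1
  generalize PySem.Str.isIn "code" (PySem.Str.lower field_id) = b2
  generalize PySem.Str.isIn "number" (PySem.Str.lower field_id) = b3
  generalize PySem.Str.isIn "date" (PySem.Str.lower field_id) = b4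
  generalize PySem.Str.isIn "custom" (PySem.Str.lower field_id) = b5
  generalize PySem.Str.isIn "udf" (PySem.Str.lower field_id) = b6
  generalize PySem.Str.isIn "name" (PySem.Str.lower field_id) = b7
  generalize PySem.Str.isIn "title" (PySem.Str.lower field_id) = b8
  generalize PySem.Str.isIn "description" (PySem.Str.lower field_id) = b9
  revert b1 b2 b3 b4 b5 b6 b7 b8 b9
  decide

-- ===== VERDICT (by name: the statement is the Claim_ definition above) =====
theorem categorize_field_py_spec : Claim_equal_categorize_field_py := by
  intro field_id _
  unfold Spec_categorize_field_py
  exact categorize_field_py_agree field_id
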